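-- pv_equiv track=rewrite | github.com/6210qwe/leetcode_py | leetcode_solutions/by_id/q0466.py | count_the_repetitions
-- ===== SOURCE A (Python) =====
-- def count_the_repetitions(s1: str, n1: int, s2: str, n2: int) -> int:
--     """
--     函数式接口 - 统计重复个数
--
--     实现思路:
--     使用动态规划，记录每个s1重复周期匹配s2的进度。
--
--     Args:
--         s1: 第一个字符串
--         n1: s1的重复次数
--         s2: 第二个字符串
--         n2: s2的重复次数
--
--     Returns:
--         最大整数m，使得[str2, m]可以从str1获得
--
--     Example:
--         >>> count_the_repetitions("acb", 4, "ab", 2)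
--         2
--     """
--     # 记录每个s1周期结束时，匹配s2的进度
--     # next_index[i]表示从s2的第i个位置开始，匹配一个s1后到达的位置
--     next_index = {}
--
--     def get_next_index(s2_index: int) -> int:
--         """计算从s2的s2_index位置开始，匹配一个s1后到达的位置"""
--         if s2_index in next_index:
--             return next_index[s2_index]
--
--         count = 0
--         j = s2_index
--         for char in s1:
--             if char == s2[j % len(s2)]:
--                 j += 1
--                 if j % len(s2) == 0:
--                     count += 1
--
--         next_index[s2_index] = (j % len(s2), count)
--         return next_index[s2_index]
--
--     # 计算总共能匹配多少个s2
--     s2_index = 0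
--     total_count = 0
--
--     for _ in range(n1):
--         next_pos, count = get_next_index(s2_index)
--         total_count += count
--         s2_index = next_pos
--
--     return total_count // n2
-- ===== SOURCE B (Python) =====
-- def count_the_repetitions(s1: str, n1: int, s2: str, n2: int) -> int:
--     if n1 <= 0:
--         return 0 // n2
--
--     def step(i):
--         # feed one copy of s1 starting at s2-index i; return (new index, s2 copies completed)
--         c = 0
--         for ch in s1:
--             if ch == s2[i]:
--                 i += 1
--                 if i == len(s2):
--                     i = 0
--                     c += 1
--         return i, c
--
--     seen = []        # s2-index at the start of each simulated s1 block, in order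
--     prefix = [0]     # prefix[k] = s2 copies completed after k blocks
--     cur, tot = 0, 0
--     while len(seen) < n1 and cur not in seen:
--         seen.append(cur)
--         cur, c = step(cur)
--         tot += c
--         prefix.append(tot)
--     if len(seen) >= n1:
--         return tot // n2
--     # cycle: the block starting at index `cur` was simulated before at block `start`
--     k = len(seen)
--     start = seen.index(cur)
--     cyc = k - start
--     rem = n1 - k
--     q, r = divmod(rem, cyc)
--     total = tot + q * (prefix[k] - prefix[start]) + (prefix[start + r] - prefix[start])
--     return total // n2
-- ===== Notes on version B (the rewrite author's own statement) =====
-- stated objective: faster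
-- what changed: B simulates one s1-block per distinct s2 start index only, detects the first repeated start index and jumps over the whole repeating cycle arithmetically using prefix sums, instead of A's n1-iteration loop with a memo dict.
import Mathlib
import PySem

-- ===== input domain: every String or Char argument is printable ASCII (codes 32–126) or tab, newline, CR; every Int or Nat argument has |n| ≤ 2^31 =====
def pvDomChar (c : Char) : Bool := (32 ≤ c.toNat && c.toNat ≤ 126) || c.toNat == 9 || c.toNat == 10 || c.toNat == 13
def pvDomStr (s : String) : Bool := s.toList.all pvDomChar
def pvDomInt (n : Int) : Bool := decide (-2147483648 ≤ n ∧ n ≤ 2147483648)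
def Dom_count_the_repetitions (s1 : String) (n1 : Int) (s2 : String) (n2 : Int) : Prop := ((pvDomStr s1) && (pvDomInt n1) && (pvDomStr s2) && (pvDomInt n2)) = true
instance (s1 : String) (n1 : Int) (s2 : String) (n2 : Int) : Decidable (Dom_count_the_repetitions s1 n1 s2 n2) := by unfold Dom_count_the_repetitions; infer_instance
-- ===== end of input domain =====

-- B replaces A's n1-iteration memoized loop by cycle detection over s2 start indices
-- with an arithmetic jump over repeated cycles (asymptotically faster, in a timing run).

-- ===== PORT A =====
-- inner 'for char in s1' of get_next_index; s2[j % len(s2)] is read via pyGet?/getD: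
-- exact whenever s2 ≠ "" (Pre_ excludes the ZeroDivisionError inputs s2 = "" with n1 ≥ 1)
def pvABody (s2 : List Char) (st : Int × Int) (ch : Char) : Int × Int :=
  if ch = (PySem.List.pyGet? s2 (PySem.Int.mod st.1 (s2.length : Int))).getD (Char.ofNat 0) then
    if PySem.Int.mod (st.1 + 1) (s2.length : Int) = 0 then (st.1 + 1, st.2 + 1)
    else (st.1 + 1, st.2)
  else st

def pvAStep (s1 s2 : List Char) (j0 : Int) : Int × Int :=
  s1.foldl (pvABody s2) (j0, 0)

-- get_next_index with its memo dict next_index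
def pvGetNext (s1 s2 : List Char) (memo : PySem.Dict Int (Int × Int)) (i : Int) :
    PySem.Dict Int (Int × Int) × (Int × Int) :=
  match memo.get? i with
  | some v => (memo, v)
  | none =>
      let jc := pvAStep s1 s2 i
      let v := (PySem.Int.mod jc.1 (s2.length : Int), jc.2)
      (memo.insert i v, v)

-- body of 'for _ in range(n1)': state (next_index, s2_index, total_count)
def pvALoopBody (s1 s2 : List Char) (st : PySem.Dict Int (Int × Int) × Int × Int) (_ : Int) :
    PySem.Dict Int (Int × Int) × Int × Int :=
  let r := pvGetNext s1 s2 st.1 st.2.1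
  (r.1, r.2.1, st.2.2 + r.2.2)

def count_the_repetitions (s1 : String) (n1 : Int) (s2 : String) (n2 : Int) : Int :=
  PySem.Int.floordiv
    (((PySem.List.pyRange 0 n1 1).foldl (pvALoopBody s1.toList s2.toList)
        (PySem.Dict.empty, 0, 0)).2.2) n2

-- ===== PORT B =====
-- B's step(i): feed one copy of s1 starting at s2-index i; s2[i] via getD (exact for i < len s2,
-- which holds on every reachable state when s2 ≠ ""; Pre_ excludes s2 = "" with n1 ≥ 1)
def pvBBody (s2 : List Char) (st : Nat × Nat) (ch : Char) : Nat × Nat :=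
  if ch = s2.getD st.1 (Char.ofNat 0) then
    if st.1 + 1 = s2.length then (0, st.2 + 1) else (st.1 + 1, st.2)
  else st

def pvBStep (s1 s2 : List Char) (i0 : Nat) : Nat × Nat :=
  s1.foldl (pvBBody s2) (i0, 0)

-- B's while loop; fuel = n1 - len(seen) realises the 'len(seen) < n1' test
def pvBLoop (s1 s2 : List Char) (fuel : Nat) (seen prefx : List Nat) (cur tot : Nat) :
    List Nat × List Nat × Nat × Nat :=
  match fuel with
  | 0 => (seen, prefx, cur, tot)
  | f + 1 =>
    if cur ∈ seen then (seen, prefx, cur, tot)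
    else
      let r := pvBStep s1 s2 cur
      pvBLoop s1 s2 f (seen ++ [cur]) (prefx ++ [tot + r.2]) r.1 (tot + r.2)

def count_the_repetitions_alt (s1 : String) (n1 : Int) (s2 : String) (n2 : Int) : Int :=
  if n1 ≤ 0 then PySem.Int.floordiv 0 n2
  else
    let st := pvBLoop s1.toList s2.toList n1.toNat [] [0] 0 0
    let seen := st.1
    let prefx := st.2.1
    let cur := st.2.2.1
    let tot := st.2.2.2
    if n1.toNat ≤ seen.length then PySem.Int.floordiv (tot : Int) n2
    else
      let k := seen.length
      let start := (PySem.List.index? seen cur).getD 0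
      let cyc := k - start
      let rem := n1.toNat - k
      let q := rem / cyc
      let r := rem % cyc
      -- prefix[..] reads are in range here; divmod on the nonnegative rem, cyc is Nat '/', '%'
      let total : Int := (tot : Int)
        + (q : Int) * ((prefx.getD k 0 : Int) - (prefx.getD start 0 : Int))
        + ((prefx.getD (start + r) 0 : Int) - (prefx.getD start 0 : Int))
      PySem.Int.floordiv total n2

-- ===== PRECONDITION & SPEC =====
-- Pre_ excludes exactly the inputs where A raises: n2 = 0 (ZeroDivisionError in total_count // n2)
-- and s2 = "" with n1 ≥ 1 (ZeroDivisionError in j % len(s2)).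
def Pre_count_the_repetitions (s1 : String) (n1 : Int) (s2 : String) (n2 : Int) : Prop :=
  (n1 ≤ 0 ∨ s2 ≠ "") ∧ n2 ≠ 0
instance (s1 : String) (n1 : Int) (s2 : String) (n2 : Int) : Decidable (Pre_count_the_repetitions s1 n1 s2 n2) := by unfold Pre_count_the_repetitions; infer_instance
def pvWitness_count_the_repetitions : String × Int × String × Int := ("acb", 4, "ab", 2)

def Spec_count_the_repetitions (s1 : String) (n1 : Int) (s2 : String) (n2 : Int) (out : Int) : Prop := out = count_the_repetitions_alt s1 n1 s2 n2
instance (s1 : String) (n1 : Int) (s2 : String) (n2 : Int) (out : Int) : Decidable (Spec_count_the_repetitions s1 n1 s2 n2 out) := by unfold Spec_count_the_repetitions; infer_instance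

-- ===== CLAIM (what is proved, stated in full; the proofs are below) =====
def Claim_equal_count_the_repetitions : Prop := ∀ (s1 : String) (n1 : Int) (s2 : String) (n2 : Int), Dom_count_the_repetitions s1 n1 s2 n2 → Pre_count_the_repetitions s1 n1 s2 n2 → Spec_count_the_repetitions s1 n1 s2 n2 (count_the_repetitions s1 n1 s2 n2)

-- ===== LEMMAS AND PROOFS =====

-- The pure model shared by both proofs: pvIdx n = s2-index after n blocks, pvTot n = copies of s2
-- completed after n blocks (both defined through B's step function pvBStep).
def pvIdx (s1 s2 : List Char) : Nat → Nat
  | 0 => 0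
  | n + 1 => (pvBStep s1 s2 (pvIdx s1 s2 n)).1

def pvTot (s1 s2 : List Char) : Nat → Nat
  | 0 => 0
  | n + 1 => pvTot s1 s2 n + (pvBStep s1 s2 (pvIdx s1 s2 n)).2

lemma pvSuccMod (j L : Nat) (h : 0 < L) :
    (j + 1) % L = if j % L + 1 = L then 0 else j % L + 1 := by
  have h1 : j % L < L := Nat.mod_lt _ h
  have hd : L * (j / L) + j % L = j := Nat.div_add_mod j L
  split_ifs with hc
  · have e : j + 1 = L * (j / L + 1) := by rw [Nat.mul_add, Nat.mul_one]; omega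
    rw [e, Nat.mul_mod_right]
  · have e : j + 1 = L * (j / L) + (j % L + 1) := by omega
    rw [e, Nat.mul_add_mod]
    exact Nat.mod_eq_of_lt (by omega)

lemma pvBBody_fst_lt (s2 : List Char) (h : 0 < s2.length) :
    ∀ (l : List Char) (st : Nat × Nat), st.1 < s2.length →
      (l.foldl (pvBBody s2) st).1 < s2.length := by
  intro l
  induction l with
  | nil => intro st hst; exact hst
  | cons ch l ih =>
    intro st hst
    simp only [List.foldl_cons]
    apply ih
    unfold pvBBody
    split_ifs with h1 h2
    · exact h
    · simpa using Nat.lt_of_le_of_ne (by omega) h2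
    · exact hst

lemma pvIdx_lt (s1 s2 : List Char) (h : 0 < s2.length) : ∀ n, pvIdx s1 s2 n < s2.length := by
  intro n
  induction n with
  | zero => exact h
  | succ n ih => exact pvBBody_fst_lt s2 h s1 _ ih

-- Step relation: A's absolute index j corresponds to B's wrapped index j % len s2, counts agree.
lemma pvStep_rel (s1 s2 : List Char) (h : 0 < s2.length) :
    ∀ (l : List Char) (j c : Nat), ∃ j' : Nat,
      l.foldl (pvABody s2) ((j : Int), (c : Int)) =
        ((j' : Int), ((l.foldl (pvBBody s2) (j % s2.length, c)).2 : Int)) ∧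
      j' % s2.length = (l.foldl (pvBBody s2) (j % s2.length, c)).1 := by
  intro l
  induction l with
  | nil => intro j c; exact ⟨j, rfl, rfl⟩
  | cons ch l ih =>
    intro j c
    have hjL : j % s2.length < s2.length := Nat.mod_lt _ h
    have hA : (PySem.List.pyGet? s2 (PySem.Int.mod (j : Int) (s2.length : Int))).getD (Char.ofNat 0)
        = s2[j % s2.length] := by
      rw [PySem.Int.mod_natCast, PySem.List.pyGet?_natCast]
      simp [List.getElem?_eq_getElem hjL]
    have hB : s2.getD (j % s2.length) (Char.ofNat 0) = s2[j % s2.length] :=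
      List.getD_eq_getElem s2 _ hjL
    have hAc : PySem.Int.mod ((j : Int) + 1) (s2.length : Int) = (((j + 1) % s2.length : Nat) : Int) := by
      have e : ((j : Int) + 1) = ((j + 1 : Nat) : Int) := by push_cast; ring
      rw [e, PySem.Int.mod_natCast]
    have hmod : (j + 1) % s2.length = if j % s2.length + 1 = s2.length then 0
        else j % s2.length + 1 := pvSuccMod j s2.length h
    simp only [List.foldl_cons]
    have hget : s2[j % s2.length]?.getD (Char.ofNat 0) = s2[j % s2.length] := by
      rw [List.getElem?_eq_getElem hjL]
      rfl
    by_cases hch : ch = s2[j % s2.length]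
    · by_cases hw : j % s2.length + 1 = s2.length
      · have hz : (j + 1) % s2.length = 0 := by rw [hmod]; simp [hw]
        have e1 : pvABody s2 ((j : Int), (c : Int)) ch = (((j + 1 : Nat) : Int), ((c + 1 : Nat) : Int)) := by
          unfold pvABody
          rw [hA, if_pos hch, hAc, hz]
          simp only [Nat.cast_zero, if_pos rfl]
          constructor <;> push_cast <;> ring
        have e2 : pvBBody s2 (j % s2.length, c) ch = ((j + 1) % s2.length, c + 1) := by
          unfold pvBBody
          simp only [List.getD, hget]
          rw [if_pos hch, if_pos hw, hz]
        rw [e1, e2]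
        exact ih (j + 1) (c + 1)
      · have hz : (j + 1) % s2.length = j % s2.length + 1 := by rw [hmod]; simp [hw]
        have hz0 : ¬ ((((j + 1) % s2.length : Nat) : Int) = 0) := by
          have : ¬ ((j + 1) % s2.length = 0) := by omega
          exact_mod_cast this
        have e1 : pvABody s2 ((j : Int), (c : Int)) ch = (((j + 1 : Nat) : Int), ((c : Nat) : Int)) := by
          unfold pvABody
          rw [hA, if_pos hch, hAc, if_neg hz0]
          simp only [Prod.mk.injEq]
          constructor <;> push_cast <;> ring
        have e2 : pvBBody s2 (j % s2.length, c) ch = ((j + 1) % s2.length, c) := by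
          unfold pvBBody
          simp only [List.getD, hget]
          rw [if_pos hch, if_neg hw, hz]
        rw [e1, e2]
        exact ih (j + 1) c
    · have e1 : pvABody s2 ((j : Int), (c : Int)) ch = ((j : Int), (c : Int)) := by
        unfold pvABody
        rw [hA, if_neg hch]
      have e2 : pvBBody s2 (j % s2.length, c) ch = (j % s2.length, c) := by
        unfold pvBBody
        simp only [List.getD, hget]
        rw [if_neg hch]
      rw [e1, e2]
      exact ih j c

-- A's pvAStep started at a reduced index i computes B's step of i (count) and an absolute
-- index whose reduction is B's next index.
lemma pvAStep_rel (s1 s2 : List Char) (h : 0 < s2.length) (i : Nat) (hi : i < s2.length) :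
    ∃ j' : Nat, pvAStep s1 s2 (i : Int) = ((j' : Int), ((pvBStep s1 s2 i).2 : Int)) ∧
      j' % s2.length = (pvBStep s1 s2 i).1 := by
  have hmod : i % s2.length = i := Nat.mod_eq_of_lt hi
  obtain ⟨j', h1, h2⟩ := pvStep_rel s1 s2 h s1 i 0
  rw [hmod] at h1 h2
  exact ⟨j', by simpa [pvAStep, pvBStep] using h1, by simpa [pvBStep] using h2⟩

-- Memo invariant: every stored entry is the (cast) value of B's step function at its key.
def pvGood (s1 s2 : List Char) (memo : PySem.Dict Int (Int × Int)) : Prop :=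
  ∀ (k : Int) (v : Int × Int), memo.get? k = some v →
    ∃ i : Nat, k = (i : Int) ∧
      v = (((pvBStep s1 s2 i).1 : Int), ((pvBStep s1 s2 i).2 : Int))

lemma pvGetNext_rel (s1 s2 : List Char) (h : 0 < s2.length)
    (memo : PySem.Dict Int (Int × Int)) (hG : pvGood s1 s2 memo) (i : Nat) (hi : i < s2.length) :
    (pvGetNext s1 s2 memo (i : Int)).2
        = (((pvBStep s1 s2 i).1 : Int), ((pvBStep s1 s2 i).2 : Int)) ∧
      pvGood s1 s2 (pvGetNext s1 s2 memo (i : Int)).1 := by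
  unfold pvGetNext
  cases hmem : memo.get? (i : Int) with
  | some v =>
    obtain ⟨i', hk, hv⟩ := hG _ _ hmem
    have : i' = i := by exact_mod_cast hk.symm
    subst this
    exact ⟨by simp [hv], hG⟩
  | none =>
    obtain ⟨j', h1, h2⟩ := pvAStep_rel s1 s2 h i hi
    have hval : (PySem.Int.mod (pvAStep s1 s2 (i : Int)).1 (s2.length : Int), (pvAStep s1 s2 (i : Int)).2)
        = (((pvBStep s1 s2 i).1 : Int), ((pvBStep s1 s2 i).2 : Int)) := by
      rw [h1]
      simp [PySem.Int.mod_natCast, h2]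
    refine ⟨by simp [hval], ?_⟩
    intro k v hkv
    by_cases hk : k = (i : Int)
    · subst hk
      rw [PySem.Dict.get?_insert_self] at hkv
      exact ⟨i, rfl, by simpa [hval] using hkv.symm⟩
    · rw [PySem.Dict.get?_insert_of_ne _ _ hk] at hkv
      exact hG _ _ hkv

-- A's main loop from block m: the accumulated total grows by pvTot (m + len l) - pvTot m.
lemma pvALoop_rel (s1 s2 : List Char) (h : 0 < s2.length) :
    ∀ (l : List Int) (memo : PySem.Dict Int (Int × Int)) (hG : pvGood s1 s2 memo)
      (m : Nat) (t : Int),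
      (l.foldl (pvALoopBody s1 s2) (memo, ((pvIdx s1 s2 m : Nat) : Int), t)).2.2
        = t + ((pvTot s1 s2 (m + l.length) : Nat) : Int) - ((pvTot s1 s2 m : Nat) : Int) := by
  intro l
  induction l with
  | nil => intro memo hG m t; simp
  | cons a l ih =>
    intro memo hG m t
    have hi : pvIdx s1 s2 m < s2.length := pvIdx_lt s1 s2 h m
    obtain ⟨hval, hG'⟩ := pvGetNext_rel s1 s2 h memo hG _ hi
    simp only [List.foldl_cons]
    have hbody : pvALoopBody s1 s2 (memo, ((pvIdx s1 s2 m : Nat) : Int), t) a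
        = ((pvGetNext s1 s2 memo ((pvIdx s1 s2 m : Nat) : Int)).1,
           ((pvIdx s1 s2 (m + 1) : Nat) : Int),
           t + ((pvBStep s1 s2 (pvIdx s1 s2 m)).2 : Int)) := by
      simp only [pvALoopBody]
      rw [hval]
      rfl
    rw [hbody, ih _ hG' (m + 1) _]
    have e1 : pvTot s1 s2 (m + 1) = pvTot s1 s2 m + (pvBStep s1 s2 (pvIdx s1 s2 m)).2 := rfl
    have e2 : m + 1 + l.length = m + (a :: l).length := by simp; omega
    rw [e2, e1]
    push_cast
    ring

-- B's loop invariant: starting after k simulated blocks it reaches some k' where it stops,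
-- either with all n blocks simulated or at the first repeated start index.
lemma pvBLoop_rel (s1 s2 : List Char) (n : Nat) :
    ∀ (fuel k : Nat), fuel = n - k → k ≤ n →
    ∃ k', k ≤ k' ∧ k' ≤ n ∧
      pvBLoop s1 s2 fuel ((List.range k).map (pvIdx s1 s2))
          ((List.range (k + 1)).map (pvTot s1 s2)) (pvIdx s1 s2 k) (pvTot s1 s2 k)
        = ((List.range k').map (pvIdx s1 s2), (List.range (k' + 1)).map (pvTot s1 s2),
           pvIdx s1 s2 k', pvTot s1 s2 k') ∧
      (k' = n ∨ (k' < n ∧ ∃ s, s < k' ∧ pvIdx s1 s2 s = pvIdx s1 s2 k')) := by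
  intro fuel
  induction fuel with
  | zero =>
    intro k hf hk
    have : k = n := by omega
    subst this
    exact ⟨k, le_refl _, le_refl _, rfl, Or.inl rfl⟩
  | succ f ih =>
    intro k hf hk
    have hkn : k < n := by omega
    by_cases hmem : pvIdx s1 s2 k ∈ (List.range k).map (pvIdx s1 s2)
    · obtain ⟨s, hs, hsk⟩ := by simpa using hmem
      exact ⟨k, le_refl _, le_of_lt hkn,
        by simp [pvBLoop, hmem], Or.inr ⟨hkn, s, hs, hsk⟩⟩
    · have hstep : pvBLoop s1 s2 (f + 1) ((List.range k).map (pvIdx s1 s2))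
          ((List.range (k + 1)).map (pvTot s1 s2)) (pvIdx s1 s2 k) (pvTot s1 s2 k)
          = pvBLoop s1 s2 f ((List.range (k + 1)).map (pvIdx s1 s2))
              ((List.range (k + 2)).map (pvTot s1 s2)) (pvIdx s1 s2 (k + 1)) (pvTot s1 s2 (k + 1)) := by
        have e1 : (List.range (k + 1)).map (pvIdx s1 s2)
            = (List.range k).map (pvIdx s1 s2) ++ [pvIdx s1 s2 k] := by
          simp [List.range_succ]
        have e2 : (List.range (k + 2)).map (pvTot s1 s2)
            = (List.range (k + 1)).map (pvTot s1 s2) ++ [pvTot s1 s2 (k + 1)] := by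
          simp [List.range_succ]
        simp only [pvBLoop, if_neg hmem]
        rw [e1, e2]
        rfl
      obtain ⟨k', h1, h2, h3, h4⟩ := ih (k + 1) (by omega) (by omega)
      exact ⟨k', by omega, h2, by rw [hstep]; exact h3, h4⟩

-- Periodicity of the block sequence once an index repeats.
lemma pvIdx_period (s1 s2 : List Char) (s cyc : Nat)
    (hc : pvIdx s1 s2 (s + cyc) = pvIdx s1 s2 s) :
    ∀ m, pvIdx s1 s2 (s + cyc + m) = pvIdx s1 s2 (s + m) := by
  intro m
  induction m with
  | zero => simpa using hc
  | succ m ihm =>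
    show pvIdx s1 s2 ((s + cyc + m) + 1) = pvIdx s1 s2 ((s + m) + 1)
    simp only [pvIdx, ihm]

lemma pvTot_period (s1 s2 : List Char) (s cyc : Nat)
    (hc : pvIdx s1 s2 (s + cyc) = pvIdx s1 s2 s) :
    ∀ m, pvTot s1 s2 (s + cyc + m) + pvTot s1 s2 s
        = pvTot s1 s2 (s + m) + pvTot s1 s2 (s + cyc) := by
  intro m
  induction m with
  | zero => simp [Nat.add_comm]
  | succ m ihm =>
    have e1 : pvTot s1 s2 ((s + cyc + m) + 1)
        = pvTot s1 s2 (s + cyc + m) + (pvBStep s1 s2 (pvIdx s1 s2 (s + cyc + m))).2 := rfl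
    have e2 : pvTot s1 s2 ((s + m) + 1)
        = pvTot s1 s2 (s + m) + (pvBStep s1 s2 (pvIdx s1 s2 (s + m))).2 := rfl
    have e3 := pvIdx_period s1 s2 s cyc hc m
    show pvTot s1 s2 ((s + cyc + m) + 1) + pvTot s1 s2 s
        = pvTot s1 s2 ((s + m) + 1) + pvTot s1 s2 (s + cyc)
    rw [e1, e2, e3]
    omega

lemma pvTot_cycles (s1 s2 : List Char) (s cyc : Nat)
    (hc : pvIdx s1 s2 (s + cyc) = pvIdx s1 s2 s) :
    ∀ (q r : Nat), ((pvTot s1 s2 (s + q * cyc + r) : Nat) : Int)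
        = (pvTot s1 s2 (s + r) : Int)
          + (q : Int) * ((pvTot s1 s2 (s + cyc) : Int) - (pvTot s1 s2 s : Int)) := by
  intro q
  induction q with
  | zero => intro r; simp
  | succ q ihq =>
    intro r
    have hidx : s + (q + 1) * cyc + r = s + cyc + (q * cyc + r) := by ring
    have h1 := pvTot_period s1 s2 s cyc hc (q * cyc + r)
    have h2 : s + (q * cyc + r) = s + q * cyc + r := by ring
    rw [h2] at h1
    have h3 := ihq r
    have h1' : ((pvTot s1 s2 (s + cyc + (q * cyc + r)) : Nat) : Int) + (pvTot s1 s2 s : Int)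
        = (pvTot s1 s2 (s + q * cyc + r) : Int) + (pvTot s1 s2 (s + cyc) : Int) := by
      exact_mod_cast congrArg (Nat.cast : Nat → Int) h1
    rw [hidx]
    push_cast at h1' h3 ⊢
    linarith

-- A in the main case: with n1 > 0 and s2 nonempty, A returns (pvTot n1.toNat) // n2.
lemma pvA_main (s1 s2 : List Char) (h : 0 < s2.length) (n1 n2 : Int) (hn1 : 0 < n1) :
    PySem.Int.floordiv
      (((PySem.List.pyRange 0 n1 1).foldl (pvALoopBody s1 s2) (PySem.Dict.empty, 0, 0)).2.2) n2
      = PySem.Int.floordiv ((pvTot s1 s2 n1.toNat : Nat) : Int) n2 := by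
  have hG : pvGood s1 s2 PySem.Dict.empty := by
    intro k v hkv
    rw [PySem.Dict.get?_empty] at hkv
    exact absurd hkv (by simp)
  have h0 : ((0 : Int)) = ((pvIdx s1 s2 0 : Nat) : Int) := by simp [pvIdx]
  have := pvALoop_rel s1 s2 h (PySem.List.pyRange 0 n1 1) PySem.Dict.empty hG 0 0
  rw [show ((PySem.Dict.empty : PySem.Dict Int (Int × Int)), (0 : Int), (0 : Int))
      = (PySem.Dict.empty, ((pvIdx s1 s2 0 : Nat) : Int), (0 : Int)) by rw [← h0]] 
  rw [this]
  have hlen : (PySem.List.pyRange 0 n1 1).length = n1.toNat := by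
    rw [PySem.List.length_pyRange_one]; omega
  rw [hlen]
  simp [pvTot]

-- prefix/seen list reads
lemma pvSeen_getElem (s1 s2 : List Char) (k j : Nat) (hj : j < k) :
    ((List.range k).map (pvIdx s1 s2))[j]'(by simpa using hj) = pvIdx s1 s2 j := by
  simp

-- B in the main case returns the same value.
lemma pvB_main (s1 s2 : List Char) (h : 0 < s2.length) (n n2 : Int) (hn : 0 < n) :
    (if n ≤ 0 then PySem.Int.floordiv 0 n2
     else
       let st := pvBLoop s1 s2 n.toNat [] [0] 0 0
       let seen := st.1
       let prefx := st.2.1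
       let cur := st.2.2.1
       let tot := st.2.2.2
       if n.toNat ≤ seen.length then PySem.Int.floordiv (tot : Int) n2
       else
         let k := seen.length
         let start := (PySem.List.index? seen cur).getD 0
         let cyc := k - start
         let rem := n.toNat - k
         let q := rem / cyc
         let r := rem % cyc
         let total : Int := (tot : Int)
           + (q : Int) * ((prefx.getD k 0 : Int) - (prefx.getD start 0 : Int))
           + ((prefx.getD (start + r) 0 : Int) - (prefx.getD start 0 : Int))
         PySem.Int.floordiv total n2)
      = PySem.Int.floordiv ((pvTot s1 s2 n.toNat : Nat) : Int) n2 := by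
  rw [if_neg (by omega)]
  have h00 : ([] : List Nat) = (List.range 0).map (pvIdx s1 s2) := by simp
  have h01 : ([0] : List Nat) = (List.range 1).map (pvTot s1 s2) := by simp [pvTot]
  obtain ⟨k', hk0, hkn, heq, hcase⟩ := pvBLoop_rel s1 s2 n.toNat n.toNat 0 (by omega) (by omega)
  have heq' : pvBLoop s1 s2 n.toNat ((List.range 0).map (pvIdx s1 s2))
      ((List.range 1).map (pvTot s1 s2)) 0 0
      = ((List.range k').map (pvIdx s1 s2), (List.range (k' + 1)).map (pvTot s1 s2),
         pvIdx s1 s2 k', pvTot s1 s2 k') := heq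
  rw [h01, h00, heq']
  simp only [List.length_map, List.length_range]
  rcases hcase with hdone | ⟨hlt, s0', hs0', hrep'⟩
  · subst hdone
    rw [if_pos (le_refl _)]
  · rw [if_neg (by omega)]
    -- the repeated index is in seen, so index? returns some s0 with pvIdx s0 = pvIdx k'
    have hmem : pvIdx s1 s2 k' ∈ (List.range k').map (pvIdx s1 s2) := by
      simp only [List.mem_map, List.mem_range]
      exact ⟨s0', hs0', hrep'⟩
    obtain ⟨s0, hsome⟩ := Option.isSome_iff_exists.mp
      ((PySem.List.index?_isSome_iff _ _).mpr hmem)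
    obtain ⟨hs0len, hs0val, _⟩ := PySem.List.getElem_of_index?_eq_some hsome
    have hs0k : s0 < k' := by simpa using hs0len
    have hrep : pvIdx s1 s2 s0 = pvIdx s1 s2 k' := by
      have := hs0val
      rwa [pvSeen_getElem s1 s2 k' s0 hs0k] at this
    rw [hsome]
    simp only [Option.getD_some]
    set cyc := k' - s0 with hcyc
    have hcyc0 : 0 < cyc := by omega
    set rem := n.toNat - k' with hrem
    set q := rem / cyc with hq
    set r := rem % cyc with hr
    have hscyc : s0 + cyc = k' := by omega
    have hper : pvIdx s1 s2 (s0 + cyc) = pvIdx s1 s2 s0 := by rw [hscyc]; exact hrep.symm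
    have hrlt : r < cyc := Nat.mod_lt _ hcyc0
    have hn' : n.toNat = s0 + (q + 1) * cyc + r := by
      have hdm : cyc * q + r = rem := by rw [hq, hr]; exact Nat.div_add_mod rem cyc
      have hmul : (q + 1) * cyc = cyc * q + cyc := by ring
      omega
    -- prefix reads
    have hg1 : ((List.range (k' + 1)).map (pvTot s1 s2)).getD k' 0 = pvTot s1 s2 k' :=
      PySem.List.getD_map_range _ _ _ _ (by omega)
    have hg2 : ((List.range (k' + 1)).map (pvTot s1 s2)).getD s0 0 = pvTot s1 s2 s0 :=
      PySem.List.getD_map_range _ _ _ _ (by omega)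
    have hg3 : ((List.range (k' + 1)).map (pvTot s1 s2)).getD (s0 + r) 0 = pvTot s1 s2 (s0 + r) :=
      PySem.List.getD_map_range _ _ _ _ (by omega)
    rw [hg1, hg2, hg3]
    have hcyctot := pvTot_cycles s1 s2 s0 cyc hper (q + 1) r
    rw [← hn'] at hcyctot
    rw [hcyctot, hscyc]
    congr 1
    push_cast
    ring


-- ===== VERDICT (by name: the statement is the Claim_ definition above) =====
theorem count_the_repetitions_spec : Claim_equal_count_the_repetitions := by
  intro s1 n1 s2 n2 _ hpre
  obtain ⟨hp1, hp2⟩ := hpre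
  unfold Spec_count_the_repetitions
  by_cases hn : n1 ≤ 0
  · have hA : count_the_repetitions s1 n1 s2 n2 = PySem.Int.floordiv 0 n2 := by
      unfold count_the_repetitions
      rw [PySem.List.pyRange_one]
      rw [show (n1 - 0).toNat = 0 by omega]
      simp
    have hB : count_the_repetitions_alt s1 n1 s2 n2 = PySem.Int.floordiv 0 n2 := by
      unfold count_the_repetitions_alt
      rw [if_pos hn]
    rw [hA, hB]
  · have hn' : 0 < n1 := by omega
    have hs2 : s2 ≠ "" := by
      rcases hp1 with hh | hh
      · omega
      · exact hh
    have hlen : 0 < s2.toList.length := by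
      cases h2 : s2.toList with
      | nil =>
        exfalso
        apply hs2
        have h3 := congrArg String.ofList h2
        simpa using h3
      | cons a l => simp
    calc count_the_repetitions s1 n1 s2 n2
        = PySem.Int.floordiv ((pvTot s1.toList s2.toList n1.toNat : Nat) : Int) n2 := by
          unfold count_the_repetitions
          exact pvA_main s1.toList s2.toList hlen n1 n2 hn'
      _ = count_the_repetitions_alt s1 n1 s2 n2 := by
          unfold count_the_repetitions_alt
          exact (pvB_main s1.toList s2.toList hlen n1 n2 hn').symm
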